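-- pv_equiv track=rewrite | github.com/pypi-data/pypi-mirror-377 | packages/sup-lang/sup_lang-2.8.0-py3-none-any.whl/sup/transpiler.py | _encode_vlq
-- ===== SOURCE A (Python) =====
-- _VLQ_CHARS = "ABCDEFGHIJKLMNOPQRSTUVWXYZabcdefghijklmnopqrstuvwxyz0123456789+/"
--
-- def _to_vlq_signed(value: int) -> int:
--     return (value << 1) ^ (value >> 31)
--
-- def _encode_vlq(value: int) -> str:
--     vlq = _to_vlq_signed(value)
--     out = ""
--     while True:
--         digit = vlq & 31
--         vlq >>= 5
--         if vlq:
--             digit |= 32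
--         out += _VLQ_CHARS[digit]
--         if not vlq:
--             break
--     return out
-- ===== SOURCE B (Python) =====
-- _VLQ_CHARS = "ABCDEFGHIJKLMNOPQRSTUVWXYZabcdefghijklmnopqrstuvwxyz0123456789+/"
--
-- def _to_vlq_signed(value: int) -> int:
--     return (value << 1) ^ (value >> 31)
--
-- def _base32_digits(v: int) -> list:
--     # little-endian base-32 representation by recursive divmod
--     if v < 32:
--         return [v]
--     return [v % 32] + _base32_digits(v // 32)
--
-- def _encode_vlq(value: int) -> str:
--     ds = _base32_digits(_to_vlq_signed(value))
--     return "".join(_VLQ_CHARS[d + 32] for d in ds[:-1]) + _VLQ_CHARS[ds[-1]]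
-- ===== Notes on version B (the rewrite author's own statement) =====
-- stated objective: alternative
-- what changed: Replaces the single destructive bit-twiddling while loop (mask/shift/break with in-place flagging) by two stages: a recursive divmod-based conversion yielding the digit list, then a rendering pass that adds an arithmetic continuation flag to every digit but the last and joins.
import Mathlib
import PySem

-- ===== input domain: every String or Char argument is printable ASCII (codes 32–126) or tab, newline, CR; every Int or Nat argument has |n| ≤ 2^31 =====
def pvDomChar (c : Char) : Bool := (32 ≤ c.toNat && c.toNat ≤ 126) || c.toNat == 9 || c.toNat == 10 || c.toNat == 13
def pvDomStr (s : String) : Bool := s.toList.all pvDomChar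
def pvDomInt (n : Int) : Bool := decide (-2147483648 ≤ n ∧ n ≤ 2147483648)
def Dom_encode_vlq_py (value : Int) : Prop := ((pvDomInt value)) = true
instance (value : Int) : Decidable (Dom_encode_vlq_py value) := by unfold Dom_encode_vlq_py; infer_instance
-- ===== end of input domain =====

-- B replaces A's bit-twiddling shrink-and-break while loop by two stages: a recursive
-- base-32 conversion via divmod producing the digit list, then a pass that renders all
-- but the last digit with an arithmetic continuation flag (objective: alternative).

-- ===== PORT A =====
def pvChars : List Char :=
  "ABCDEFGHIJKLMNOPQRSTUVWXYZabcdefghijklmnopqrstuvwxyz0123456789+/".toList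

def to_vlq_signed (value : Int) : Int :=
  PySem.Int.bxor (value <<< 1) (value >>> 31)

-- Python's while loop, state (vlq, out).  The loop returns only when vlq reaches 0, which
-- happens exactly for initial vlq ≥ 0 (always the case on Dom, where _to_vlq_signed is ≥ 0);
-- we therefore run it on the Nat value, on which the bit operations coincide with Python's.
def vlqLoopA (vlq : Nat) (out : List Char) : List Char :=
  let digit := vlq &&& 31
  let vlq' := vlq >>> 5
  let digit := if vlq' ≠ 0 then digit ||| 32 else digit
  let out' := out ++ [pvChars.getD digit 'A']   -- _VLQ_CHARS[digit]; digit is always in range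
  if vlq' = 0 then out' else vlqLoopA vlq' out'
termination_by vlq
decreasing_by
  simp only [Nat.shiftRight_eq_div_pow] at *
  omega

def encode_vlq_py (value : Int) : String :=
  String.mk (vlqLoopA (to_vlq_signed value).toNat [])

-- ===== PORT B =====
-- _base32_digits: little-endian base-32 digits by recursive divmod
def base32Digits (v : Nat) : List Nat :=
  if v < 32 then [v] else v % 32 :: base32Digits (v / 32)
termination_by v
decreasing_by omega

-- "".join(_VLQ_CHARS[d + 32] for d in ds[:-1]) + _VLQ_CHARS[ds[-1]]
def renderDigits (ds : List Nat) : List Char :=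
  ds.dropLast.map (fun d => pvChars.getD (d + 32) 'A') ++ [pvChars.getD (ds.getLastD 0) 'A']

def encode_vlq_py_alt (value : Int) : String :=
  -- _to_vlq_signed(value) ≥ 0 on Dom (see the note at vlqLoopA), so we run on its Nat value
  String.mk (renderDigits (base32Digits (to_vlq_signed value).toNat))

-- ===== PRECONDITION & SPEC =====
def Spec_encode_vlq_py (value : Int) (out : String) : Prop := out = encode_vlq_py_alt value
instance (value : Int) (out : String) : Decidable (Spec_encode_vlq_py value out) := by unfold Spec_encode_vlq_py; infer_instance

-- ===== CLAIM (what is proved, stated in full; the proofs are below) =====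
def Claim_equal_encode_vlq_py : Prop := ∀ (value : Int), Dom_encode_vlq_py value → Spec_encode_vlq_py value (encode_vlq_py value)

-- ===== LEMMAS AND PROOFS =====

lemma and31_eq_mod (v : Nat) : v &&& 31 = v % 32 := by
  have h := Nat.and_two_pow_sub_one_eq_mod v 5
  simpa using h

lemma or32_eq_add (d : Nat) (h : d < 32) : d ||| 32 = d + 32 := by
  interval_cases d <;> decide

lemma shift5_eq_div (v : Nat) : v >>> 5 = v / 32 := by
  simp [Nat.shiftRight_eq_div_pow]

lemma loop_eq_render : ∀ (vlq : Nat) (out : List Char),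
    vlqLoopA vlq out = out ++ renderDigits (base32Digits vlq) := by
  intro vlq
  induction vlq using Nat.strong_induction_on with
  | _ vlq ih =>
    intro out
    by_cases h : vlq < 32
    · have h0 : vlq >>> 5 = 0 := by rw [shift5_eq_div]; omega
      rw [vlqLoopA, base32Digits]
      simp only [h0, ite_not, if_pos h]
      rw [renderDigits]
      simp [and31_eq_mod, Nat.mod_eq_of_lt h]
    · have h32 : 32 ≤ vlq := by omega
      have hne : vlq >>> 5 ≠ 0 := by rw [shift5_eq_div]; omega
      have hlt : vlq / 32 < vlq := by omega
      have htail : base32Digits (vlq / 32) ≠ [] := by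
        rw [base32Digits]; split <;> simp
      rw [vlqLoopA, base32Digits]
      simp only [hne, ite_not, if_neg (by omega : ¬ vlq < 32)]
      rw [shift5_eq_div, ih _ hlt]
      have hrender : renderDigits (vlq % 32 :: base32Digits (vlq / 32))
          = pvChars.getD (vlq % 32 + 32) 'A' :: renderDigits (base32Digits (vlq / 32)) := by
        rw [renderDigits, renderDigits]
        rcases List.exists_cons_of_ne_nil htail with ⟨a, as, ha⟩
        rw [ha]
        simp [List.dropLast_cons_of_ne_nil]
      rw [hrender, and31_eq_mod, or32_eq_add _ (Nat.mod_lt _ (by norm_num))]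
      simp

-- ===== VERDICT (by name: the statement is the Claim_ definition above) =====
theorem encode_vlq_py_spec : Claim_equal_encode_vlq_py := by
  intro value _
  unfold Spec_encode_vlq_py encode_vlq_py encode_vlq_py_alt
  rw [loop_eq_render]
  rfl
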